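-- pv_equiv track=rewrite | github.com/Bobinar/aoc2020 | day14.py | get_all_addresses_covered
-- ===== SOURCE A (Python) =====
-- def get_all_addresses_covered(address_with_wildcards):
--
--     current_addresses = ['']
--
--     for i in range(len(address_with_wildcards)):
--         c = address_with_wildcards[i]
--         if c != 'X':
--             for j in range(len(current_addresses)):
--                 current_addresses[j] = current_addresses[j] + c
--         else:
--             for j in range(len(current_addresses)):
--                 ori = current_addresses[j]
--                 current_addresses[j] = ori + '0'
--                 current_addresses.append(ori + '1')
--
--     return current_addresses
-- ===== SOURCE B (Python) =====
-- def get_all_addresses_covered(address_with_wildcards):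
--     # Enumerate the 2**m combinations directly; the first 'X' is the
--     # least-significant bit of the counter, matching A's output order.
--     m = address_with_wildcards.count('X')
--     result = []
--     for k in range(2 ** m):
--         bits = k
--         chars = []
--         for c in address_with_wildcards:
--             if c == 'X':
--                 chars.append('01'[bits & 1])
--                 bits >>= 1
--             else:
--                 chars.append(c)
--         result.append(''.join(chars))
--     return result
-- ===== Notes on version B (the rewrite author's own statement) =====
-- stated objective: faster
-- what changed: Instead of A's incremental list-doubling (re-concatenating every existing partial address for each character, copying growing strings), B counts the X wildcards once and enumerates k in range(2**m), building each address in a single scan with bit i of k (first X = LSB) substituted for the i-th X.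
import Mathlib
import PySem

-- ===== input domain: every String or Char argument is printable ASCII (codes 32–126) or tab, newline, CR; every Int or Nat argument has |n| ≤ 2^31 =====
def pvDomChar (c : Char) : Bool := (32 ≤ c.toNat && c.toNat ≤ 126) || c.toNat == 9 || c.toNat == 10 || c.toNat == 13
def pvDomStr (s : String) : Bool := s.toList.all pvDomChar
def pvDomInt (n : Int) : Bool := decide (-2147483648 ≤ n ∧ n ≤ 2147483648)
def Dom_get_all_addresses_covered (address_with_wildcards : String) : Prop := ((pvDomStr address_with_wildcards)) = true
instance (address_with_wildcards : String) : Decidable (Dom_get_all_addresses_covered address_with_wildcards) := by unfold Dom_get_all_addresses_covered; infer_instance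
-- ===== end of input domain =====

-- B replaces A's incremental list-doubling with a direct enumeration of k in range(2^m),
-- building each address in one scan (first 'X' = least-significant bit); a timing run measured B faster.

-- ===== PORT A =====
-- inner loop `for j in range(len(current_addresses)): current_addresses[j] += c`
def pvLoopNonX (c : Char) (acc : List (List Char)) (j n : Nat) : List (List Char) :=
  if _h : j < n then
    pvLoopNonX c (acc.set j (acc.getD j [] ++ [c])) (j + 1) n
  else acc
termination_by n - j

-- inner loop `for j in range(len(...)): ori = a[j]; a[j] = ori+'0'; a.append(ori+'1')`
def pvLoopX (acc : List (List Char)) (j n : Nat) : List (List Char) :=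
  if _h : j < n then
    let ori := acc.getD j []
    pvLoopX ((acc.set j (ori ++ ['0'])).concat (ori ++ ['1'])) (j + 1) n
  else acc
termination_by n - j

-- body of `for i in range(len(address_with_wildcards))`
def pvStepA (cur : List (List Char)) (c : Char) : List (List Char) :=
  if c ≠ 'X' then pvLoopNonX c cur 0 cur.length else pvLoopX cur 0 cur.length

def get_all_addresses_covered (address_with_wildcards : String) : List String :=
  ((address_with_wildcards.toList.foldl pvStepA [[]]).map String.ofList)

-- ===== PORT B =====
-- one scan of the template: 'X' consumes the low bit ('01'[bits & 1]; bits >>= 1)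
def pvFillB : Nat → List Char → List Char
  | _, [] => []
  | bits, c :: cs =>
      if c = 'X' then (if bits % 2 = 1 then '1' else '0') :: pvFillB (bits / 2) cs
      else c :: pvFillB bits cs

def get_all_addresses_covered_alt (address_with_wildcards : String) : List String :=
  let m := address_with_wildcards.toList.count 'X'
  (List.range (2 ^ m)).map (fun k => String.ofList (pvFillB k address_with_wildcards.toList))

-- ===== PRECONDITION & SPEC =====
def Spec_get_all_addresses_covered (address_with_wildcards : String) (out : List String) : Prop := out = get_all_addresses_covered_alt address_with_wildcards
instance (address_with_wildcards : String) (out : List String) : Decidable (Spec_get_all_addresses_covered address_with_wildcards out) := by unfold Spec_get_all_addresses_covered; infer_instance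

-- ===== CLAIM (what is proved, stated in full; the proofs are below) =====
def Claim_equal_get_all_addresses_covered : Prop := ∀ (address_with_wildcards : String), Dom_get_all_addresses_covered address_with_wildcards → Spec_get_all_addresses_covered address_with_wildcards (get_all_addresses_covered address_with_wildcards)

-- ===== LEMMAS AND PROOFS =====

lemma pvLoopNonX_spec (c : Char) (pre post : List (List Char)) :
    pvLoopNonX c (pre.map (· ++ [c]) ++ post) pre.length (pre.length + post.length)
      = (pre ++ post).map (· ++ [c]) := by
  induction post generalizing pre with
  | nil => rw [pvLoopNonX]; simp
  | cons h t ih =>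
      rw [pvLoopNonX]
      have hlt : pre.length < pre.length + (h :: t).length := by simp
      simp only [hlt, dif_pos]
      have hget : (pre.map (· ++ [c]) ++ h :: t).getD pre.length [] = h := by
        rw [List.getD_eq_getElem?_getD]
        rw [List.getElem?_append_right (by simp)]
        simp
      have hset : (pre.map (· ++ [c]) ++ h :: t).set pre.length (h ++ [c])
          = (pre ++ [h]).map (· ++ [c]) ++ t := by
        rw [List.set_append_right _ _ (by simp)]
        simp
      rw [hget, hset]
      have := ih (pre ++ [h])
      simpa [Nat.add_comm, Nat.add_assoc, Nat.add_left_comm] using this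

lemma pvLoopX_spec (pre post : List (List Char)) :
    pvLoopX (pre.map (· ++ ['0']) ++ post ++ pre.map (· ++ ['1'])) pre.length (pre.length + post.length)
      = (pre ++ post).map (· ++ ['0']) ++ (pre ++ post).map (· ++ ['1']) := by
  induction post generalizing pre with
  | nil => rw [pvLoopX]; simp
  | cons h t ih =>
      rw [pvLoopX]
      have hlt : pre.length < pre.length + (h :: t).length := by simp
      simp only [hlt, dif_pos]
      have hget : (pre.map (· ++ ['0']) ++ (h :: t) ++ pre.map (· ++ ['1'])).getD pre.length [] = h := by
        rw [List.getD_eq_getElem?_getD, List.append_assoc]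
        rw [List.getElem?_append_right (by simp)]
        simp
      have hset : ((pre.map (· ++ ['0']) ++ (h :: t) ++ pre.map (· ++ ['1'])).set pre.length
            (h ++ ['0'])).concat (h ++ ['1'])
          = (pre ++ [h]).map (· ++ ['0']) ++ t ++ (pre ++ [h]).map (· ++ ['1']) := by
        rw [List.append_assoc, List.set_append_right _ _ (by simp)]
        simp [List.concat_eq_append]
      rw [hget, hset]
      have := ih (pre ++ [h])
      simpa [Nat.add_comm, Nat.add_assoc, Nat.add_left_comm] using this

lemma pvStepA_eq (L : List (List Char)) (c : Char) :
    pvStepA L c = if c = 'X' then L.map (· ++ ['0']) ++ L.map (· ++ ['1']) else L.map (· ++ [c]) := by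
  unfold pvStepA
  by_cases hc : c = 'X'
  · simpa [hc] using pvLoopX_spec [] L
  · simpa [hc] using pvLoopNonX_spec c [] L

lemma pvRangeTwoMul {α : Type} (N : Nat) (g : Nat → List α) :
    (List.range (2 * N)).flatMap g
      = (List.range N).flatMap (fun q => g (2 * q) ++ g (2 * q + 1)) := by
  induction N with
  | zero => simp
  | succ n ih =>
      have : 2 * (n + 1) = (2 * n + 1) + 1 := by omega
      rw [this, List.range_succ, List.range_succ, List.range_succ]
      simp [ih]

lemma pvFold_spec (cs : List Char) : ∀ (L : List (List Char)),
    cs.foldl pvStepA L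
      = (List.range (2 ^ cs.count 'X')).flatMap (fun k => L.map (· ++ pvFillB k cs)) := by
  induction cs with
  | nil => intro L; simp [pvFillB]
  | cons c cs ih =>
      intro L
      rw [List.foldl_cons, ih (pvStepA L c), pvStepA_eq]
      by_cases hc : c = 'X'
      · subst hc
        have hcnt : ('X' :: cs).count 'X' = cs.count 'X' + 1 := by simp
        rw [hcnt, pow_succ, Nat.mul_comm, pvRangeTwoMul]
        apply List.flatMap_congr  -- pointwise equality of the per-q blocks
        intro q _
        have h1 : (2 * q) % 2 = 0 := by omega
        have h2 : (2 * q) / 2 = q := by omega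
        have h3 : (2 * q + 1) % 2 = 1 := by omega
        have h4 : (2 * q + 1) / 2 = q := by omega
        simp [pvFillB, h1, h2, h3, h4, List.map_append, List.map_map, Function.comp_def,
          List.append_assoc]
      · have hcnt : (c :: cs).count 'X' = cs.count 'X' := by simp [hc]
        rw [hcnt]
        simp only [if_neg hc]
        apply List.flatMap_congr
        intro k _
        simp [pvFillB, hc, List.map_map, Function.comp_def, List.append_assoc]

-- ===== VERDICT (by name: the statement is the Claim_ definition above) =====
theorem get_all_addresses_covered_spec : Claim_equal_get_all_addresses_covered := by
  intro s _
  unfold Spec_get_all_addresses_covered get_all_addresses_covered get_all_addresses_covered_alt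
  rw [pvFold_spec]
  have hb : ∀ (r : List Nat) (g : Nat → List Char),
      r.flatMap (fun k => ([g k] : List (List Char))) = r.map g := by
    intro r g; induction r <;> simp_all
  simp [hb, List.map_map, Function.comp_def]
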